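-- pv_equiv track=rewrite | github.com/morington/TelegramReader | TelegramReader/__main__.py | get_text_chunk
-- ===== SOURCE A (Python) =====
-- LIMIT_LETTERS_FOR_PAGE = 1700  # 1500-2500
--
-- def get_text_chunk(full_text: str, offset: int):
--     limit = min(offset + LIMIT_LETTERS_FOR_PAGE, len(full_text))
--
--     if limit < len(full_text):
--         while full_text[limit] not in " .,!?-":
--             limit -= 1
--             if limit == offset:
--                 break
--
--     chunk = full_text[offset:limit]
--     return chunk
-- ===== SOURCE B (Python) =====
-- LIMIT_LETTERS_FOR_PAGE = 1700  # 1500-2500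
--
-- def get_text_chunk(full_text: str, offset: int):
--     limit = min(offset + LIMIT_LETTERS_FOR_PAGE, len(full_text))
--     if limit < len(full_text):
--         best = offset
--         for d in " .,!?-":
--             best = max(best, full_text.rfind(d, offset + 1, limit + 1))
--         limit = best
--     return full_text[offset:limit]
-- ===== Notes on version B (the rewrite author's own statement) =====
-- stated objective: idiomatic
-- what changed: Replaces A's manual backward character-by-character while-loop scan with one str.rfind call per delimiter over the window, taking the maximum hit position (fallback offset).
import Mathlib
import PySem

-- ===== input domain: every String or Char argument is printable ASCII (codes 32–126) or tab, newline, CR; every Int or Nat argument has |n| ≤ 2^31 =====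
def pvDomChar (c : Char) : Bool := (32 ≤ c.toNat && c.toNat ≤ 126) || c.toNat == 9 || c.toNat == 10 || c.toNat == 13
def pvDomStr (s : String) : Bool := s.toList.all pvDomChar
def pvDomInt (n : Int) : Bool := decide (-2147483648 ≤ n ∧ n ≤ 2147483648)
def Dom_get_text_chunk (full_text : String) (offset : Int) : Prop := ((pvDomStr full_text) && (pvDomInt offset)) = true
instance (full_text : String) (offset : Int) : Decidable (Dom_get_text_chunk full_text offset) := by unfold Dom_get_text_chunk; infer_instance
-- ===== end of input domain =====

-- B replaces A's backward character-by-character scan with one rfind call per delimiter over the window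
-- (idiomatic; same asymptotic cost).

-- ===== PORT A =====
def pvDelims : List Char := [' ', '.', ',', '!', '?', '-']

-- A's while-loop: while full_text[limit] not a delimiter, limit -= 1; break when limit == offset.
-- Fuel (limit - offset).toNat bounds the iteration count exactly; pyGet? = none is where Python raises IndexError.
def pvScanA (cs : List Char) (offset : Int) : Nat → Int → Int
  | 0, limit => limit
  | fuel + 1, limit =>
    match PySem.List.pyGet? cs limit with
    | none => limit
    | some c =>
      if pvDelims.contains c then limit
      else if limit - 1 = offset then offset
      else pvScanA cs offset fuel (limit - 1)

def get_text_chunk (full_text : String) (offset : Int) : String :=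
  let cs := full_text.toList
  let limit : Int := min (offset + 1700) (cs.length : Int)
  let limit :=
    if limit < (cs.length : Int) then pvScanA cs offset (limit - offset).toNat limit else limit
  String.ofList (PySem.List.slice cs (some offset) (some limit))

-- ===== PORT B =====
-- str.rfind(c, s, e): highest index in [s, e) holding c, else -1, scanning backward;
-- bounds clamped as Python clamps them.  Exact hand port (rfind is not in PySem).
def pvRFindLoop (cs : List Char) (c : Char) (s : Int) : Nat → Int
  | 0 => -1
  | k + 1 => if PySem.List.pyGet? cs (s + k) = some c then s + (k : Int) else pvRFindLoop cs c s k

def pvRFind (cs : List Char) (c : Char) (s e : Int) : Int :=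
  let n : Int := cs.length
  let s' := if s < 0 then max (s + n) 0 else min s n
  let e' := if e < 0 then max (e + n) 0 else min e n
  pvRFindLoop cs c s' (e' - s').toNat

def get_text_chunk_alt (full_text : String) (offset : Int) : String :=
  let cs := full_text.toList
  let limit : Int := min (offset + 1700) (cs.length : Int)
  let limit :=
    if limit < (cs.length : Int) then
      pvDelims.foldl (fun best d => max best (pvRFind cs d (offset + 1) (limit + 1))) offset
    else limit
  String.ofList (PySem.List.slice cs (some offset) (some limit))

-- ===== PRECONDITION & SPEC =====
-- Pre_ excludes only the negative offsets on which A's backward scan actually runs (offset < 0 with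
-- offset + 1700 < len): there A either raises IndexError or returns a slice shaped by Python's
-- negative-index wraparound, an accident of A's implementation no caller would specify.
def Pre_get_text_chunk (full_text : String) (offset : Int) : Prop :=
  0 ≤ offset ∨ (full_text.toList.length : Int) ≤ offset + 1700
instance (full_text : String) (offset : Int) : Decidable (Pre_get_text_chunk full_text offset) := by
  unfold Pre_get_text_chunk; infer_instance

def pvWitness_get_text_chunk : String × Int := ("hello world, page one.", 0)

def Spec_get_text_chunk (full_text : String) (offset : Int) (out : String) : Prop := out = get_text_chunk_alt full_text offset
instance (full_text : String) (offset : Int) (out : String) : Decidable (Spec_get_text_chunk full_text offset out) := by unfold Spec_get_text_chunk; infer_instance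

-- ===== CLAIM (what is proved, stated in full; the proofs are below) =====
def Claim_equal_get_text_chunk : Prop := ∀ (full_text : String) (offset : Int), Dom_get_text_chunk full_text offset → Pre_get_text_chunk full_text offset → Spec_get_text_chunk full_text offset (get_text_chunk full_text offset)

-- ===== LEMMAS AND PROOFS =====

lemma foldl_max_ge_init (l : List Char) (f : Char → Int) (init : Int) :
    init ≤ l.foldl (fun b d => max b (f d)) init := by
  induction l generalizing init with
  | nil => simp
  | cons x xs ih => exact le_trans (le_max_left _ _) (ih _)

lemma foldl_max_le (l : List Char) (f : Char → Int) (init m : Int)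
    (h0 : init ≤ m) (hf : ∀ d ∈ l, f d ≤ m) :
    l.foldl (fun b d => max b (f d)) init ≤ m := by
  induction l generalizing init with
  | nil => simpa using h0
  | cons x xs ih =>
    exact ih _ (max_le h0 (hf x (by simp))) (fun d hd => hf d (by simp [hd]))

lemma foldl_max_ge_of_mem (l : List Char) (f : Char → Int) (init : Int)
    {d : Char} (hd : d ∈ l) : f d ≤ l.foldl (fun b d => max b (f d)) init := by
  induction l generalizing init with
  | nil => cases hd
  | cons x xs ih =>
    rcases List.mem_cons.mp hd with h | h
    · subst h; exact le_trans (le_max_right _ _) (foldl_max_ge_init _ _ _)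
    · exact ih _ h

lemma foldl_max_eq (l : List Char) (f : Char → Int) (init m : Int)
    (h0 : init ≤ m) (hf : ∀ d ∈ l, f d ≤ m) (hex : ∃ d ∈ l, f d = m) :
    l.foldl (fun b d => max b (f d)) init = m := by
  obtain ⟨d, hd, hfd⟩ := hex
  exact le_antisymm (foldl_max_le l f init m h0 hf) (hfd ▸ foldl_max_ge_of_mem l f init hd)

lemma rfindLoop_le (cs : List Char) (c : Char) (s : Int) (hs : 0 ≤ s) :
    ∀ k : Nat, pvRFindLoop cs c s k ≤ s + k - 1 := by
  intro k
  induction k with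
  | zero => simp [pvRFindLoop]; omega
  | succ k ih =>
    simp only [pvRFindLoop]
    split
    · push_cast; omega
    · refine le_trans ih ?_; push_cast; omega

-- The heart: A's backward scan over (offset, offset+j] equals B's per-delimiter max of rfind scans.
lemma scan_eq_fold (cs : List Char) (offset : Int) (h0 : 0 ≤ offset) :
    ∀ j : Nat, 1 ≤ j → offset + j < (cs.length : Int) →
      pvScanA cs offset j (offset + j) =
      pvDelims.foldl (fun best d => max best (pvRFindLoop cs d (offset + 1) j)) offset := by
  intro j
  induction j with
  | zero => omega
  | succ j ih =>
    intro _ hlt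
    have hcast : ((j + 1 : Nat) : Int) = (j : Int) + 1 := by push_cast; ring
    rw [hcast] at hlt ⊢
    have hrange : PySem.Raise.InRange cs.length (offset + ((j : Int) + 1)) := by
      constructor <;> omega
    obtain ⟨c, hc⟩ : ∃ c, PySem.List.pyGet? cs (offset + ((j : Int) + 1)) = some c := by
      rcases h : PySem.List.pyGet? cs (offset + ((j : Int) + 1)) with _ | c
      · exact absurd ((PySem.List.pyGet?_eq_none_iff _ _).mp h) (not_not_intro hrange)
      · exact ⟨c, rfl⟩
    by_cases hdel : pvDelims.contains c = true
    · -- char at the top of the window is a delimiter: both sides return offset + j + 1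
      have hA : pvScanA cs offset (j + 1) (offset + ((j : Int) + 1)) = offset + ((j : Int) + 1) := by
        simp only [pvScanA, hc, hdel, if_true]
      rw [hA]
      refine (foldl_max_eq _ _ _ _ (by omega) ?_ ?_).symm
      · intro d _
        have := rfindLoop_le cs d (offset + 1) (by omega) (j + 1)
        push_cast at this ⊢; omega
      · refine ⟨c, by simpa using hdel, ?_⟩
        show pvRFindLoop cs c (offset + 1) (j + 1) = _
        simp only [pvRFindLoop]
        rw [show offset + 1 + (j : Int) = offset + ((j : Int) + 1) by ring, hc]
        simp
    · -- not a delimiter: A steps down, every rfind window shrinks by one position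
      have hA : pvScanA cs offset (j + 1) (offset + ((j : Int) + 1)) =
          if offset + ((j : Int) + 1) - 1 = offset then offset
          else pvScanA cs offset j (offset + ((j : Int) + 1) - 1) := by
        simp only [pvScanA, hc, hdel, if_false, Bool.false_eq_true]
      have hshrink :
          pvDelims.foldl (fun best d => max best (pvRFindLoop cs d (offset + 1) (j + 1))) offset
          = pvDelims.foldl (fun best d => max best (pvRFindLoop cs d (offset + 1) j)) offset := by
        refine PySem.List.foldl_congr_mem _ _ _ _ ?_
        intro acc d hd
        have hne : ¬ PySem.List.pyGet? cs (offset + 1 + (j : Int)) = some d := by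
          rw [show offset + 1 + (j : Int) = offset + ((j : Int) + 1) by ring, hc]
          intro h
          exact hdel (by simpa [List.contains_iff_mem] using (Option.some_injective _ h) ▸ hd)
        simp only [pvRFindLoop, if_neg hne]
      rw [hshrink]
      rcases Nat.eq_zero_or_pos j with hj | hj
      · subst hj
        rw [hA, if_pos (by norm_num)]
        refine (le_antisymm (foldl_max_le _ _ _ _ le_rfl fun d _ => ?_)
          (foldl_max_ge_init _ _ _)).symm
        simp only [pvRFindLoop]; omega
      · rw [hA, if_neg (by omega), show offset + ((j : Int) + 1) - 1 = offset + (j : Int) by ring]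
        exact ih hj (by omega)

-- Inside the window of the main theorem, pvRFind's Python bound clamping is the identity.
lemma rfind_eq_loop (cs : List Char) (d : Char) (offset : Int) (h0 : 0 ≤ offset)
    (hlt : offset + 1700 < (cs.length : Int)) :
    pvRFind cs d (offset + 1) (offset + 1700 + 1) = pvRFindLoop cs d (offset + 1) 1700 := by
  unfold pvRFind
  have hs : ¬ offset + 1 < 0 := by omega
  have he : ¬ offset + 1700 + 1 < 0 := by omega
  simp only [hs, he, if_false]
  rw [min_eq_left (le_of_lt (by omega : offset + 1 < (cs.length : Int))),
    min_eq_left (by omega : offset + 1700 + 1 ≤ (cs.length : Int)),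
    show offset + 1700 + 1 - (offset + 1) = (1700 : Int) by ring]
  rfl

-- ===== VERDICT (by name: the statement is the Claim_ definition above) =====
theorem get_text_chunk_spec : Claim_equal_get_text_chunk := by
  intro full_text offset _ hpre
  unfold Spec_get_text_chunk get_text_chunk get_text_chunk_alt
  set cs := full_text.toList with hcs
  by_cases hlt : offset + 1700 < (cs.length : Int)
  · have h0 : (0 : Int) ≤ offset := by
      rcases hpre with h | h
      · exact h
      · rw [hcs] at hlt; omega
    have hmin : min (offset + 1700) (cs.length : Int) = offset + 1700 := min_eq_left (by omega)
    simp only [hmin, if_pos hlt]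
    have hfuel : (offset + 1700 - offset).toNat = 1700 := by omega
    have hkey := scan_eq_fold cs offset h0 1700 (by norm_num) (by push_cast; omega)
    rw [show ((1700 : Nat) : Int) = (1700 : Int) from by norm_num] at hkey
    have hfold :
        pvDelims.foldl (fun best d => max best (pvRFind cs d (offset + 1) (offset + 1700 + 1))) offset
        = pvDelims.foldl (fun best d => max best (pvRFindLoop cs d (offset + 1) 1700)) offset :=
      PySem.List.foldl_congr_mem _ _ _ _
        (fun acc d _ => by rw [rfind_eq_loop cs d offset h0 hlt])
    rw [hfuel, hkey, hfold]
  · have hmin : min (offset + 1700) (cs.length : Int) = (cs.length : Int) := min_eq_right (by omega)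
    simp [hmin]
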